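-- pv_equiv track=rewrite | github.com/bdenckla/MAM-for-STEPBible | py/my_uni_heb.py | _get_pre_lines
-- ===== SOURCE A (Python) =====
-- def _get_pre_lines(sep, segment):
--     pre_lines = []
--     nsruns = segment.split(sep)  # nsrun: non-sep run
--     for nsrun in nsruns[:-1]:
--         if nsrun:
--             pre_lines.append(nsrun)
--         pre_lines.append(sep)
--     if nsruns[-1]:
--         pre_lines.append(nsruns[-1])
--     return pre_lines
-- ===== SOURCE B (Python) =====
-- def _get_pre_lines(sep, segment):
--     if not sep:
--         raise ValueError('empty separator')
--     out = []
--     rest = segment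
--     while True:
--         j = rest.find(sep)
--         if j < 0:
--             break
--         if j > 0:
--             out.append(rest[:j])
--         out.append(sep)
--         rest = rest[j + len(sep):]
--     if rest:
--         out.append(rest)
--     return out
-- ===== Notes on version B (the rewrite author's own statement) =====
-- stated objective: alternative
-- what changed: B replaces A's split-then-interleave pass (split into runs, loop re-inserting the separator, drop empty runs) with a single find-driven scan that walks the string by separator occurrences and emits non-empty chunks and separators directly, never materialising the run list.
import Mathlib
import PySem

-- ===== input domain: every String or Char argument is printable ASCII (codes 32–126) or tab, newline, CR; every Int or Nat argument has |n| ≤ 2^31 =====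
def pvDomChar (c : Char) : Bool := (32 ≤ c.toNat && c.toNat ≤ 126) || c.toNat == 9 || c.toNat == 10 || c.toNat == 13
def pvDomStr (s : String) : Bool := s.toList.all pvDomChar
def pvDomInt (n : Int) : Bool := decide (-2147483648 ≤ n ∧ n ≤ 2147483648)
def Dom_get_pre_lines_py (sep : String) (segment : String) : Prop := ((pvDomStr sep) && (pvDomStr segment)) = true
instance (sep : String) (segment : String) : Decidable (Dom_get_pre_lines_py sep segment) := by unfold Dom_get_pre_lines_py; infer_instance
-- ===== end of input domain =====

-- B replaces A's split-then-interleave pass with a single find-driven scan; equivalence of return values is proved for sep ≠ "".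

-- ===== PORT A =====
-- A: nsruns = segment.split(sep); loop over nsruns[:-1] re-inserting sep and dropping empty runs, then the last run.
def get_pre_lines_py (sep : String) (segment : String) : List String :=
  match PySem.Str.split? segment sep with
  | none => []          -- sep = "": Python raises ValueError; excluded by Pre_
  | some nsruns =>
    let pre_lines := (PySem.List.slice nsruns none (some (-1))).foldl
      (fun acc nsrun => (if nsrun ≠ "" then acc ++ [nsrun] else acc) ++ [sep]) []
    match PySem.List.pyGet? nsruns (-1) with
    | none => pre_lines  -- unreachable: split always returns a non-empty list
    | some last => if last ≠ "" then pre_lines ++ [last] else pre_lines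

-- ===== PORT B =====
-- termination helper for bLoop, stated up front because the port cites it
theorem pvDropLt (sep l : List Char) (hs : sep ≠ [])
    (h : ¬ PySem.Chars.find l sep < 0) :
    (PySem.List.slice l (some (PySem.Chars.find l sep + ↑sep.length)) none).length < l.length := by
  have hj : 0 ≤ PySem.Chars.find l sep := le_of_not_gt h
  have hspec := (PySem.Chars.find_spec hj).1
  have hle : sep.length ≤ (List.drop (PySem.Chars.find l sep).toNat l).length :=
    hspec.length_le
  rw [List.length_drop] at hle
  have hsl : 1 ≤ sep.length := List.length_pos_iff.mpr hs
  rw [PySem.List.slice_from l (by omega : (0:Int) ≤ PySem.Chars.find l sep + ↑sep.length)]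
  rw [List.length_drop]
  omega

-- B's while loop: j = rest.find(sep); emit rest[:j] if non-empty, emit sep, continue on rest[j+len(sep):].
def bLoop (sep : List Char) (hs : sep ≠ []) (rest : List Char) : List (List Char) :=
  if h : PySem.Chars.find rest sep < 0 then
    (if rest ≠ [] then [rest] else [])
  else
    (if 0 < PySem.Chars.find rest sep then [PySem.List.slice rest none (some (PySem.Chars.find rest sep))] else [])
      ++ [sep] ++ bLoop sep hs (PySem.List.slice rest (some (PySem.Chars.find rest sep + sep.length)) none)
termination_by rest.length
decreasing_by exact pvDropLt sep rest hs h

def get_pre_lines_py_alt (sep : String) (segment : String) : List String :=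
  if hs : sep.toList = [] then []   -- 'if not sep: raise ValueError'; excluded by Pre_
  else (bLoop sep.toList hs segment.toList).map String.ofList

-- ===== PRECONDITION & SPEC =====
-- Pre_ excludes exactly sep = "", on which both A (str.split) and B (its explicit guard) raise ValueError.
def Pre_get_pre_lines_py (sep : String) (segment : String) : Prop := sep ≠ ""
instance (sep : String) (segment : String) : Decidable (Pre_get_pre_lines_py sep segment) := by
  unfold Pre_get_pre_lines_py; infer_instance
def pvWitness_get_pre_lines_py : String × String := (",", "a,,b,")

def Spec_get_pre_lines_py (sep : String) (segment : String) (out : List String) : Prop :=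
  out = get_pre_lines_py_alt sep segment
instance (sep : String) (segment : String) (out : List String) : Decidable (Spec_get_pre_lines_py sep segment out) := by
  unfold Spec_get_pre_lines_py; infer_instance

-- ===== CLAIM (what is proved, stated in full; the proofs are below) =====
def Claim_equal_get_pre_lines_py : Prop := ∀ (sep : String) (segment : String), Dom_get_pre_lines_py sep segment → Pre_get_pre_lines_py sep segment → Spec_get_pre_lines_py sep segment (get_pre_lines_py sep segment)

-- ===== LEMMAS AND PROOFS =====
theorem find_go_shift (sub : List Char) :
    ∀ (l : List Char) (k : Nat), PySem.Chars.find.go sub l k =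
      if PySem.Chars.find.go sub l 0 = -1 then -1 else k + PySem.Chars.find.go sub l 0 := by
  intro l
  induction l with
  | nil =>
    intro k
    rw [PySem.Chars.find.go, PySem.Chars.find.go]
    by_cases he : sub.isEmpty = true <;> simp [he]
  | cons c rest ih =>
    intro k
    rw [PySem.Chars.find.go, PySem.Chars.find.go]
    by_cases hp : sub.isPrefixOf (c :: rest) = true
    · simp [hp]
    · simp only [hp, if_false]
      rw [ih (k + 1), ih 1]
      have hge : -1 ≤ PySem.Chars.find.go sub rest 0 := by
        have := PySem.Chars.neg_one_le_find rest sub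
        unfold PySem.Chars.find at this; exact this
      by_cases h0 : PySem.Chars.find.go sub rest 0 = -1
      · simp [h0]
      · have h1 : ¬ (1 + PySem.Chars.find.go sub rest 0 = -1) := by omega
        simp [h0, h1]
        ring

theorem find_cons_not_prefix (sep : List Char) (c : Char) (rest : List Char)
    (hp : ¬ sep.isPrefixOf (c :: rest) = true) :
    PySem.Chars.find (c :: rest) sep =
      if PySem.Chars.find rest sep = -1 then -1 else PySem.Chars.find rest sep + 1 := by
  unfold PySem.Chars.find
  rw [PySem.Chars.find.go]
  simp only [hp, if_false]
  rw [find_go_shift]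
  by_cases h0 : PySem.Chars.find.go sep rest 0 = -1
  · simp [h0]
  · simp [h0]
    omega

theorem find_of_prefix (sep l : List Char) (hp : sep.isPrefixOf l = true) :
    PySem.Chars.find l sep = 0 := by
  unfold PySem.Chars.find
  cases l with
  | nil =>
    have hse : sep = [] := List.prefix_nil.mp (List.isPrefixOf_iff_prefix.mp hp)
    rw [PySem.Chars.find.go]
    simp [hse]
  | cons c rest => rw [PySem.Chars.find.go]; simp [hp]

theorem find_nil_of_ne (sep : List Char) (hs : sep ≠ []) :
    PySem.Chars.find [] sep = -1 := by
  unfold PySem.Chars.find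
  rw [PySem.Chars.find.go]
  simp [List.isEmpty_iff, hs]

def mySplit (sep : List Char) (hs : sep ≠ []) (l : List Char) : List (List Char) :=
  if h : PySem.Chars.find l sep < 0 then [l]
  else l.take (PySem.Chars.find l sep).toNat ::
    mySplit sep hs (PySem.List.slice l (some (PySem.Chars.find l sep + sep.length)) none)
termination_by l.length
decreasing_by exact pvDropLt sep l hs h

theorem mySplit_ne_nil (sep : List Char) (hs : sep ≠ []) (l : List Char) :
    mySplit sep hs l ≠ [] := by
  rw [mySplit]
  split <;> simp

def mapFirst (f : List Char → List Char) : List (List Char) → List (List Char)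
  | [] => []
  | x :: xs => f x :: xs

theorem splitOn_go_eq (sep : List Char) (hs : sep ≠ []) :
    ∀ (fuel : Nat) (l cur : List Char) (acc : List (List Char)), l.length ≤ fuel →
      PySem.Chars.splitOn.go sep fuel l cur acc =
        acc.reverse ++ mapFirst (cur.reverse ++ ·) (mySplit sep hs l) := by
  intro fuel
  induction fuel with
  | zero =>
    intro l cur acc hl
    have : l = [] := List.length_eq_zero_iff.mp (Nat.le_zero.mp hl)
    subst this
    rw [PySem.Chars.splitOn.go, mySplit]
    simp [find_nil_of_ne sep hs, mapFirst]
  | succ fuel ih =>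
    intro l cur acc hl
    have hsl1 : 1 ≤ sep.length := List.length_pos_iff.mpr hs
    cases l with
    | nil =>
      rw [PySem.Chars.splitOn.go, mySplit]
      simp [find_nil_of_ne sep hs, mapFirst]
      omega
    | cons c rest =>
      rw [PySem.Chars.splitOn.go]
      by_cases hp : sep.isPrefixOf (c :: rest) = true
      · simp only [hp, if_true]
        rw [ih _ [] (cur.reverse :: acc) (by simp at hl ⊢; omega)]
        conv_rhs => rw [mySplit]
        rw [find_of_prefix sep _ hp]
        have hslice : PySem.List.slice (c :: rest) (some ((0:Int) + ↑sep.length)) none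
            = List.drop sep.length (c :: rest) := by
          rw [PySem.List.slice_from _ (by positivity)]
          norm_num
        simp [hslice, mapFirst]
        cases mySplit sep hs (List.drop sep.length (c :: rest)) <;> rfl
      · simp only [hp, if_false]
        rw [ih rest (c :: cur) acc (by simp at hl ⊢; omega)]
        have hfc := find_cons_not_prefix sep c rest hp
        have hge : -1 ≤ PySem.Chars.find rest sep := PySem.Chars.neg_one_le_find rest sep
        conv_rhs => rw [mySplit]
        rw [mySplit]
        by_cases h0 : PySem.Chars.find rest sep = -1
        · rw [hfc, if_pos h0] at *
          simp [h0, mapFirst]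
        · have hj : 0 ≤ PySem.Chars.find rest sep := by omega
          rw [hfc, if_neg h0]
          have h1 : ¬ (PySem.Chars.find rest sep + 1 < 0) := by omega
          have h2 : ¬ (PySem.Chars.find rest sep < 0) := by omega
          rw [dif_neg h1, dif_neg h2]
          have htake : (PySem.Chars.find rest sep + 1).toNat = (PySem.Chars.find rest sep).toNat + 1 := by omega
          have hslice : PySem.List.slice (c :: rest) (some (PySem.Chars.find rest sep + 1 + ↑sep.length)) none
              = PySem.List.slice rest (some (PySem.Chars.find rest sep + ↑sep.length)) none := by
            rw [PySem.List.slice_from _ (by omega : (0:Int) ≤ PySem.Chars.find rest sep + 1 + ↑sep.length),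
                PySem.List.slice_from _ (by omega : (0:Int) ≤ PySem.Chars.find rest sep + ↑sep.length)]
            have : (PySem.Chars.find rest sep + 1 + ↑sep.length).toNat
                = (PySem.Chars.find rest sep + ↑sep.length).toNat + 1 := by omega
            rw [this, List.drop_succ_cons]
          rw [htake, hslice]
          simp [mapFirst]

theorem splitOn_eq_mySplit (sep : List Char) (hs : sep ≠ []) (l : List Char) :
    PySem.Chars.splitOn l sep = mySplit sep hs l := by
  unfold PySem.Chars.splitOn
  rw [splitOn_go_eq sep hs (l.length + 1) l [] [] (by omega)]
  simp
  cases mySplit sep hs l <;> simp [mapFirst]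

def interleave (sep : List Char) : List (List Char) → List (List Char)
  | [] => []
  | [x] => if x = [] then [] else [x]
  | x :: y :: xs => ((if x = [] then [] else [x]) ++ [sep]) ++ interleave sep (y :: xs)

theorem interleave_cons (sep : List Char) (x : List Char) (m : List (List Char)) (hm : m ≠ []) :
    interleave sep (x :: m) = ((if x = [] then [] else [x]) ++ [sep]) ++ interleave sep m := by
  cases m with
  | nil => exact absurd rfl hm
  | cons y ys => rfl

theorem bLoop_eq_interleave (sep : List Char) (hs : sep ≠ []) (l : List Char) :
    bLoop sep hs l = interleave sep (mySplit sep hs l) := by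
  rw [bLoop, mySplit]
  by_cases h : PySem.Chars.find l sep < 0
  · rw [dif_pos h, dif_pos h]
    by_cases hl : l = [] <;> simp [hl, interleave]
  · rw [dif_neg h, dif_neg h]
    rw [interleave_cons sep _ _ (mySplit_ne_nil sep hs _)]
    rw [bLoop_eq_interleave sep hs (PySem.List.slice l (some (PySem.Chars.find l sep + sep.length)) none)]
    have hj : 0 ≤ PySem.Chars.find l sep := le_of_not_gt h
    have htake : PySem.List.slice l none (some (PySem.Chars.find l sep)) = l.take (PySem.Chars.find l sep).toNat :=
      PySem.List.slice_to l hj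
    -- take j l = [] ↔ j = 0 (l is nonempty because sep occurs in it)
    have hlne : l ≠ [] := by
      intro he
      rw [he, find_nil_of_ne sep hs] at h
      omega
    have hiff : (l.take (PySem.Chars.find l sep).toNat = []) ↔ ¬ 0 < PySem.Chars.find l sep := by
      rw [List.take_eq_nil_iff]
      constructor
      · intro hc
        rcases hc with hc | hc
        · omega
        · exact absurd hc hlne
      · intro hc; left; omega
    by_cases h0 : 0 < PySem.Chars.find l sep
    · rw [if_pos h0, htake, if_neg (by rw [hiff]; omega)]
    · rw [if_neg h0, if_pos (hiff.mpr h0)]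
termination_by l.length
decreasing_by exact pvDropLt sep l hs h

theorem foldl_shape (sep : String) : ∀ (l acc : List String),
    l.foldl (fun acc nsrun => (if nsrun ≠ "" then acc ++ [nsrun] else acc) ++ [sep]) acc
      = acc ++ l.flatMap (fun r => (if r ≠ "" then [r] else []) ++ [sep]) := by
  intro l
  induction l with
  | nil => intro acc; simp
  | cons x xs ih =>
    intro acc
    rw [List.foldl_cons, ih, List.flatMap_cons]
    split_ifs <;> simp

theorem slice_neg_one {α : Type} (xs : List α) :
    PySem.List.slice xs none (some (-1)) = xs.dropLast := by
  simp [PySem.List.slice]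
  rw [List.dropLast_eq_take]

theorem pyGet_neg_one {α : Type} (xs : List α) :
    PySem.List.pyGet? xs (-1) = xs.getLast? := by
  cases xs with
  | nil => simp [PySem.List.pyGet?]
  | cons x t =>
    rw [PySem.List.pyGet?_neg _ (by norm_num) (by simp)]
    rw [List.getLast?_eq_getElem?]
    norm_num

theorem combine_flat (sep : String) : ∀ (m : List (List Char)), m ≠ [] →
    ((m.map String.ofList).dropLast.flatMap (fun r => (if r ≠ "" then [r] else []) ++ [sep])) ++
      (match (m.map String.ofList).getLast? with
        | none => []
        | some last => if last ≠ "" then [last] else []) =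
      (interleave sep.toList m).map String.ofList := by
  intro m
  induction m with
  | nil => intro h; exact absurd rfl h
  | cons x t ih =>
    intro _
    cases t with
    | nil =>
      simp only [List.map_cons, List.map_nil, List.dropLast_singleton, List.flatMap_nil,
        List.getLast?_singleton, List.nil_append, interleave]
      by_cases hx : x = []
      · simp [hx]
      · have : String.ofList x ≠ "" := by
          intro he
          apply hx
          have := congrArg String.toList he
          simpa using this
        simp [hx, this]
    | cons y ys =>
      have ihy := ih (by simp)
      rw [interleave_cons sep.toList x (y :: ys) (by simp)]
      simp only [List.map_cons] at ihy ⊢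
      rw [List.dropLast_cons_of_ne_nil (by simp), List.flatMap_cons]
      rw [List.getLast?_cons_cons]
      rw [List.append_assoc]
      rw [ihy]
      by_cases hx : x = []
      · simp [hx]
      · have hx' : String.ofList x ≠ "" := by
          intro he
          apply hx
          have := congrArg String.toList he
          simpa using this
        simp [hx, hx', String.ofList_toList]

-- ===== VERDICT (by name: the statement is the Claim_ definition above) =====
theorem get_pre_lines_py_spec : Claim_equal_get_pre_lines_py := by
  intro sep segment _ hpre
  unfold Spec_get_pre_lines_py
  have hs : sep.toList ≠ [] := fun h => hpre (String.toList_eq_nil_iff.mp h)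
  unfold get_pre_lines_py get_pre_lines_py_alt
  rw [dif_neg hs]
  have hsplit : PySem.Str.split? segment sep
      = some ((mySplit sep.toList hs segment.toList).map String.ofList) := by
    unfold PySem.Str.split? PySem.Chars.split?
    rw [if_neg (by simp [List.isEmpty_iff, hs])]
    rw [splitOn_eq_mySplit sep.toList hs]
    rfl
  rw [hsplit, bLoop_eq_interleave sep.toList hs]
  have hne : (mySplit sep.toList hs segment.toList).map String.ofList ≠ [] := by
    simp [mySplit_ne_nil sep.toList hs]
  have hcf := combine_flat sep (mySplit sep.toList hs segment.toList)
    (mySplit_ne_nil sep.toList hs segment.toList)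
  simp only [slice_neg_one, foldl_shape, pyGet_neg_one, List.nil_append]
  rcases hlast : ((mySplit sep.toList hs segment.toList).map String.ofList).getLast? with _ | last
  · exact absurd (List.getLast?_eq_none_iff.mp hlast) hne
  · rw [hlast] at hcf
    simp only at hcf
    dsimp only
    by_cases hl : last ≠ ""
    · rw [if_pos hl]
      rw [← hcf, if_pos hl]
    · rw [if_neg hl]
      rw [← hcf, if_neg hl]
      simp
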